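-- pv_equiv track=rewrite | github.com/Capek13/AdventOfCode2023 | day1.py | GetAndRemoveNumbersSharingAlphabets
-- ===== SOURCE A (Python) =====
-- def GetAndRemoveNumbersSharingAlphabets(numbers, indexs):
-- 	removeThisIndexs = []
-- 	for i in range(len(numbers)-1):
-- 		if (indexs[i] + len(numbers[i])) > indexs[i+1]:
-- 			del numbers[i+1]
-- 			del indexs[i+1]
-- 			return GetAndRemoveNumbersSharingAlphabets(numbers, indexs)
-- 	return numbers, indexs
-- ===== SOURCE B (Python) =====
-- def GetAndRemoveNumbersSharingAlphabets(numbers, indexs):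
--     # Single forward sweep: whenever the entry at i-1 overlaps the entry at i,
--     # delete the one at i and re-test the same position; otherwise advance.
--     # Mutates numbers and indexs in place, like the original.
--     i = 1
--     while i < len(numbers):
--         if indexs[i - 1] + len(numbers[i - 1]) > indexs[i]:
--             del numbers[i]
--             del indexs[i]
--         else:
--             i += 1
--     return numbers, indexs
-- ===== Notes on version B (the rewrite author's own statement) =====
-- stated objective: faster
-- what changed: A restarts a full scan from index 0 (via a recursive call) after every single deletion; B makes one forward sweep, deleting an overlapping entry and re-testing the same position, so the scan never restarts and there is no recursion. Pre_ excludes only inputs where both programs raise IndexError (two or more numbers but fewer indexs).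
import Mathlib
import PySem

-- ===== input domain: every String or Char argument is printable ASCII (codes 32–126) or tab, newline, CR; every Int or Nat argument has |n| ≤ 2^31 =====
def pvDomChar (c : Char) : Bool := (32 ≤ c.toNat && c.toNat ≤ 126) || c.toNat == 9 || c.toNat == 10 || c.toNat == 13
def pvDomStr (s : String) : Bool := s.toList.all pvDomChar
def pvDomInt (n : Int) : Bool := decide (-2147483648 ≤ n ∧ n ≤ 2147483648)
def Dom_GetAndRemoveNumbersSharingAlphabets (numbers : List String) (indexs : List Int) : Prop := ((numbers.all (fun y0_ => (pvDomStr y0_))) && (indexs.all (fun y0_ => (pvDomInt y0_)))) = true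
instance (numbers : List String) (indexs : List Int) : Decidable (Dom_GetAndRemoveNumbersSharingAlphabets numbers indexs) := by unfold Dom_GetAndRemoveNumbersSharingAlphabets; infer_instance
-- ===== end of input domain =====

-- B replaces A's delete-then-restart-the-scan-from-0 recursion by a single forward
-- sweep that deletes an overlapping entry and re-tests the same position;
-- both A and B mutate their list arguments in place in the same way.

-- ===== PORT A =====
-- A's inner for-loop: first i with indexs[i] + len(numbers[i]) > indexs[i+1], walking both lists.
def pvFindOv (numbers : List String) (indexs : List Int) : Option Nat :=
  match numbers, indexs with
  | n1 :: n2 :: ns, i1 :: i2 :: is =>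
      if i1 + PySem.Str.len n1 > i2 then some 0
      else (pvFindOv (n2 :: ns) (i2 :: is)).map (· + 1)
  | _, _ => none

-- bound needed by the port's termination argument
theorem pvFindOv_some_bounds {numbers : List String} {indexs : List Int} {k : Nat}
    (h : pvFindOv numbers indexs = some k) : k + 1 < numbers.length ∧ k + 1 < indexs.length := by
  induction numbers generalizing indexs k with
  | nil => simp [pvFindOv] at h
  | cons n1 ns ih =>
    match ns, indexs with
    | [], _ => simp [pvFindOv] at h
    | n2 :: ns', [] => simp [pvFindOv] at h
    | n2 :: ns', [i1] => simp [pvFindOv] at h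
    | n2 :: ns', i1 :: i2 :: is =>
      rw [pvFindOv] at h
      split_ifs at h with hc
      · cases h; simp
      · rw [Option.map_eq_some_iff] at h
        obtain ⟨k', hk', rfl⟩ := h
        have := ih (indexs := i2 :: is) hk'
        simp at this ⊢; omega

def GetAndRemoveNumbersSharingAlphabets (numbers : List String) (indexs : List Int) : List String × List Int :=
  match h : pvFindOv numbers indexs with
  | some k =>
      GetAndRemoveNumbersSharingAlphabets (numbers.eraseIdx (k + 1)) (indexs.eraseIdx (k + 1))
  | none => (numbers, indexs)
termination_by numbers.length
decreasing_by
  have hb := (pvFindOv_some_bounds h).1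
  rw [List.length_eraseIdx]
  split <;> omega

-- ===== PORT B =====
-- Source B's while-loop: position i, delete at i on overlap with i-1, else advance.
-- List.getD ports Python's indexs[i-1]/indexs[i]: on Pre_ every access is in range
-- (outside Pre_ the Python raises IndexError, so the default is never the value claimed about).
def pvBLoop (numbers : List String) (indexs : List Int) (i : Nat) : List String × List Int :=
  if h : i < numbers.length then
    if indexs.getD (i - 1) 0 + PySem.Str.len (numbers.getD (i - 1) "") > indexs.getD i 0 then
      pvBLoop (numbers.eraseIdx i) (indexs.eraseIdx i) i
    else
      pvBLoop numbers indexs (i + 1)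
  else (numbers, indexs)
termination_by numbers.length - i
decreasing_by
  · rw [List.length_eraseIdx_of_lt h]; omega
  · omega

def GetAndRemoveNumbersSharingAlphabets_alt (numbers : List String) (indexs : List Int) : List String × List Int :=
  pvBLoop numbers indexs 1

-- ===== PRECONDITION & SPEC =====
-- Both programs raise IndexError exactly when len(numbers) ≥ 2 and len(indexs) < len(numbers); those inputs are excluded.
def Pre_GetAndRemoveNumbersSharingAlphabets (numbers : List String) (indexs : List Int) : Prop :=
  numbers.length ≤ indexs.length ∨ numbers.length ≤ 1
instance (numbers : List String) (indexs : List Int) : Decidable (Pre_GetAndRemoveNumbersSharingAlphabets numbers indexs) := by unfold Pre_GetAndRemoveNumbersSharingAlphabets; infer_instance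
def pvWitness_GetAndRemoveNumbersSharingAlphabets : List String × List Int := (["one", "two"], [0, 5])
def Spec_GetAndRemoveNumbersSharingAlphabets (numbers : List String) (indexs : List Int) (out : List String × List Int) : Prop := out = GetAndRemoveNumbersSharingAlphabets_alt numbers indexs
instance (numbers : List String) (indexs : List Int) (out : List String × List Int) : Decidable (Spec_GetAndRemoveNumbersSharingAlphabets numbers indexs out) := by unfold Spec_GetAndRemoveNumbersSharingAlphabets; infer_instance

-- ===== CLAIM (what is proved, stated in full; the proofs are below) =====
def Claim_equal_GetAndRemoveNumbersSharingAlphabets : Prop := ∀ (numbers : List String) (indexs : List Int), Dom_GetAndRemoveNumbersSharingAlphabets numbers indexs → Pre_GetAndRemoveNumbersSharingAlphabets numbers indexs → Spec_GetAndRemoveNumbersSharingAlphabets numbers indexs (GetAndRemoveNumbersSharingAlphabets numbers indexs)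

-- ===== LEMMAS AND PROOFS =====

-- Common characterisation: greedy keep over the zipped tail, plus the surplus of indexs.
def pvG (n : String) (i : Int) (pairs : List (String × Int)) : List String × List Int :=
  match pairs with
  | [] => ([n], [i])
  | (n2, i2) :: rest =>
      if i + PySem.Str.len n > i2 then pvG n i rest
      else (n :: (pvG n2 i2 rest).1, i :: (pvG n2 i2 rest).2)

def pvGreedy (numbers : List String) (indexs : List Int) : List String × List Int :=
  match numbers, indexs with
  | n :: n2 :: ns, i :: is =>
      ((pvG n i ((n2 :: ns).zip is)).1, (pvG n i ((n2 :: ns).zip is)).2 ++ is.drop (n2 :: ns).length)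
  | _, _ => (numbers, indexs)

theorem pvGreedy_short (numbers : List String) (indexs : List Int) (h : numbers.length ≤ 1) :
    pvGreedy numbers indexs = (numbers, indexs) := by
  rcases numbers with _ | ⟨n, _ | ⟨n2, ns⟩⟩
  · rcases indexs <;> rfl
  · rcases indexs <;> rfl
  · simp at h

-- ---- A = pvGreedy ----

theorem pvFindOv_short (numbers : List String) (indexs : List Int) (h : numbers.length ≤ 1) :
    pvFindOv numbers indexs = none := by
  rcases numbers with _ | ⟨n1, _ | ⟨n2, ns⟩⟩
  · rfl
  · rcases indexs with _ | ⟨i, _ | ⟨j, is⟩⟩ <;> rfl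
  · simp at h

-- "no adjacent overlap" chain condition on the zipped tail
def pvOk (n : String) (i : Int) (pairs : List (String × Int)) : Prop :=
  match pairs with
  | [] => True
  | (n2, i2) :: rest => i + PySem.Str.len n ≤ i2 ∧ pvOk n2 i2 rest

theorem pvG_of_ok {n : String} {i : Int} {pairs : List (String × Int)} (h : pvOk n i pairs) :
    pvG n i pairs = (n :: pairs.map Prod.fst, i :: pairs.map Prod.snd) := by
  induction pairs generalizing n i with
  | nil => simp [pvG]
  | cons p rest ih =>
    obtain ⟨n2, i2⟩ := p
    obtain ⟨h1, h2⟩ := h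
    rw [pvG, if_neg (by omega)]
    simp [ih h2]

theorem pvFindOv_none_ok {ns : List String} {is : List Int} {n : String} {i : Int}
    (hlen : ns.length ≤ is.length) (h : pvFindOv (n :: ns) (i :: is) = none) :
    pvOk n i (ns.zip is) := by
  induction ns generalizing is n i with
  | nil => simp [pvOk]
  | cons n2 ns' ih =>
    match is with
    | [] => simp at hlen
    | i2 :: is' =>
      rw [pvFindOv] at h
      by_cases hc : i + PySem.Str.len n > i2
      · rw [if_pos hc] at h; simp at h
      · rw [if_neg hc] at h
        rw [Option.map_eq_none_iff] at h
        show i + PySem.Str.len n ≤ i2 ∧ pvOk n2 (i2 : Int) (ns'.zip is')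
        exact ⟨by omega, ih (by simpa using hlen) h⟩

theorem pvG_erase {ns : List String} {is : List Int} {n : String} {i : Int} {k : Nat}
    (h : pvFindOv (n :: ns) (i :: is) = some k) :
    pvG n i (ns.zip is) = pvG n i ((ns.zip is).eraseIdx k) := by
  induction k generalizing ns is n i with
  | zero =>
    match ns, is with
    | [], _ => simp [pvFindOv] at h
    | n2 :: ns', [] => simp [pvFindOv] at h
    | n2 :: ns', i2 :: is' =>
      rw [pvFindOv] at h
      split_ifs at h with hc
      · simp only [List.zip_cons_cons, List.eraseIdx_cons_zero]
        rw [pvG, if_pos hc]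
      · simp at h
  | succ k ih =>
    match ns, is with
    | [], _ => simp [pvFindOv] at h
    | n2 :: ns', [] => simp [pvFindOv] at h
    | n2 :: ns', i2 :: is' =>
      rw [pvFindOv] at h
      split_ifs at h with hc
      · simp at h
      · rw [Option.map_eq_some_iff] at h
        obtain ⟨k', hk', hkk⟩ := h
        have hk : k' = k := by omega
        subst hk
        simp only [List.zip_cons_cons, List.eraseIdx_cons_succ]
        rw [pvG, pvG, if_neg hc, if_neg hc, ih hk']

theorem pv_zip_eraseIdx {α β : Type} (ns : List α) :
    ∀ (is : List β) (k : Nat), (ns.eraseIdx k).zip (is.eraseIdx k) = (ns.zip is).eraseIdx k := by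
  induction ns with
  | nil => intro is k; simp
  | cons a ns ih =>
    intro is k
    match is, k with
    | [], _ => simp
    | b :: is', 0 => simp
    | b :: is', k + 1 => simp [ih is' k]

theorem pv_eraseIdx_drop {α : Type} (is : List α) :
    ∀ (k m : Nat), k < m → m ≤ is.length → (is.eraseIdx k).drop (m - 1) = is.drop m := by
  induction is with
  | nil => intro k m h1 h2; simp at h2; omega
  | cons x is' ih =>
    intro k m h1 h2
    match k, m with
    | 0, m + 1 => simp
    | k + 1, m + 1 =>
      simp only [List.eraseIdx_cons_succ, Nat.add_sub_cancel, List.drop_succ_cons]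
      have := ih k m (by omega) (by simpa using h2)
      rcases m with _ | m
      · omega
      · simpa using this

theorem pv_map_snd_zip {α β : Type} (ns : List α) :
    ∀ (is : List β), ns.length ≤ is.length → (ns.zip is).map Prod.snd = is.take ns.length := by
  induction ns with
  | nil => intro is h; simp
  | cons a ns ih =>
    intro is h
    match is with
    | [] => simp at h
    | b :: is' => simp [ih is' (by simpa using h)]

theorem pvA_short (numbers : List String) (indexs : List Int) (h : numbers.length ≤ 1) :
    GetAndRemoveNumbersSharingAlphabets numbers indexs = (numbers, indexs) := by
  rw [GetAndRemoveNumbersSharingAlphabets, pvFindOv_short numbers indexs h]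

theorem pvGreedy_cons (n n2 : String) (ns : List String) (i : Int) (is : List Int) :
    pvGreedy (n :: n2 :: ns) (i :: is) =
      ((pvG n i ((n2 :: ns).zip is)).1,
       (pvG n i ((n2 :: ns).zip is)).2 ++ is.drop (n2 :: ns).length) := rfl

theorem pv_main : ∀ (N : Nat) (numbers : List String) (indexs : List Int),
    numbers.length ≤ N → numbers.length ≤ indexs.length →
    GetAndRemoveNumbersSharingAlphabets numbers indexs = pvGreedy numbers indexs := by
  intro N
  induction N with
  | zero =>
    intro numbers indexs hN hlen
    match numbers with
    | [] => rw [pvA_short _ _ (by simp), pvGreedy_short _ _ (by simp)]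
    | _ :: _ => simp at hN
  | succ N ih =>
    intro numbers indexs hN hlen
    match numbers, indexs with
    | [], _ => rw [pvA_short _ _ (by simp), pvGreedy_short _ _ (by simp)]
    | [n], _ => rw [pvA_short _ _ (by simp), pvGreedy_short _ _ (by simp)]
    | n :: n2 :: ns, [] => simp at hlen
    | n :: n2 :: ns, i :: is =>
      have hlen' : (n2 :: ns).length ≤ is.length := by simpa using hlen
      rw [GetAndRemoveNumbersSharingAlphabets]
      split
      case h_2 hfo =>
        -- no overlap: A returns its input; the greedy pass keeps everything
        rw [pvGreedy_cons]
        rw [pvG_of_ok (pvFindOv_none_ok hlen' hfo)]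
        rw [List.map_fst_zip hlen', pv_map_snd_zip (n2 :: ns) is hlen']
        simp [List.take_append_drop]
      case h_1 k hfo =>
        have hb := pvFindOv_some_bounds hfo
        simp only [List.length_cons] at hb
        have hkns : k < (n2 :: ns).length := by simp only [List.length_cons]; omega
        have hkis : k < is.length := by omega
        rw [ih ((n :: n2 :: ns).eraseIdx (k + 1)) ((i :: is).eraseIdx (k + 1))
          (by rw [List.length_eraseIdx]; simp only [List.length_cons] at hN ⊢; split <;> omega)
          (by rw [List.length_eraseIdx, List.length_eraseIdx]
              simp only [List.length_cons] at hlen ⊢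
              split <;> split <;> omega)]
        rw [List.eraseIdx_cons_succ, List.eraseIdx_cons_succ]
        cases herase : (n2 :: ns).eraseIdx k with
        | nil =>
          -- only possible with ns = [] and k = 0
          cases k with
          | succ k' => simp at herase
          | zero =>
            have hns : ns = [] := by simpa using herase
            subst hns
            match is, hkis with
            | i2 :: is', _ =>
              rw [pvFindOv] at hfo
              have hov : i + PySem.Str.len n > i2 := by
                by_cases hc : i + PySem.Str.len n > i2
                · exact hc
                · rw [if_neg hc] at hfo; simp [pvFindOv] at hfo
              rw [pvGreedy_short _ _ (by simp), pvGreedy_cons]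
              simp only [List.zip_cons_cons, List.zip_nil_left]
              rw [pvG, if_pos hov]
              simp [pvG]
        | cons m2 ms =>
          rw [pvGreedy_cons, ← herase, pvGreedy_cons]
          rw [pv_zip_eraseIdx, ← pvG_erase hfo]
          rw [List.length_eraseIdx_of_lt hkns]
          rw [pv_eraseIdx_drop is k (n2 :: ns).length hkns hlen']

-- ---- B = pvGreedy ----

theorem pv_getD_append_len {α : Type} (l1 l2 : List α) (a d : α) :
    (l1 ++ a :: l2).getD l1.length d = a := by
  rw [List.getD_eq_getElem?_getD, List.getElem?_append_right (Nat.le_refl _)]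
  simp

theorem pv_getD_append_len_succ {α : Type} (l1 l2 : List α) (a b d : α) :
    (l1 ++ a :: b :: l2).getD (l1.length + 1) d = b := by
  rw [List.getD_eq_getElem?_getD, List.getElem?_append_right (by omega)]
  simp

theorem pv_eraseIdx_append_succ {α : Type} (l1 l2 : List α) (a b : α) :
    (l1 ++ a :: b :: l2).eraseIdx (l1.length + 1) = l1 ++ a :: l2 := by
  rw [List.eraseIdx_append_of_length_le (by omega)]
  simp

theorem pvBLoop_eq (ns : List String) :
    ∀ (is : List Int) (pn : List String) (pis : List Int) (a : String) (x : Int),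
    pn.length = pis.length → ns.length ≤ is.length →
    pvBLoop (pn ++ a :: ns) (pis ++ x :: is) (pn.length + 1) =
      (pn ++ (pvG a x (ns.zip is)).1, pis ++ (pvG a x (ns.zip is)).2 ++ is.drop ns.length) := by
  induction ns with
  | nil =>
    intro is pn pis a x hp hlen
    rw [pvBLoop, dif_neg (by simp)]
    simp [pvG]
  | cons b ns' ih =>
    intro is pn pis a x hp hlen
    match is with
    | [] => simp at hlen
    | y :: is' =>
      rw [pvBLoop, dif_pos (by simp)]
      have h1 : (pis ++ x :: y :: is').getD (pn.length + 1 - 1) 0 = x := by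
        simp only [Nat.add_sub_cancel, hp]; exact pv_getD_append_len _ _ _ _
      have h2 : (pn ++ a :: b :: ns').getD (pn.length + 1 - 1) "" = a := by
        simp only [Nat.add_sub_cancel]; exact pv_getD_append_len _ _ _ _
      have h3 : (pis ++ x :: y :: is').getD (pn.length + 1) 0 = y := by
        rw [hp]; exact pv_getD_append_len_succ _ _ _ _ _
      rw [h1, h2, h3]
      by_cases hc : x + PySem.Str.len a > y
      · rw [if_pos hc]
        rw [pv_eraseIdx_append_succ, show pn.length + 1 = pis.length + 1 by rw [hp],
            pv_eraseIdx_append_succ, ← hp]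
        rw [ih is' pn pis a x hp (by simpa using hlen)]
        simp only [List.zip_cons_cons, pvG, if_pos hc]
        simp
      · rw [if_neg hc]
        have := ih is' (pn ++ [a]) (pis ++ [x]) b y (by simp [hp]) (by simpa using hlen)
        simp only [List.length_append, List.length_cons, List.length_nil] at this
        have hre : pn ++ [a] ++ b :: ns' = pn ++ a :: b :: ns' := by simp
        have hre2 : pis ++ [x] ++ y :: is' = pis ++ x :: y :: is' := by simp
        rw [hre, hre2] at this
        rw [show pn.length + 1 + 1 = pn.length + 0 + 1 + 1 by omega] at this
        rw [show pn.length + 2 = pn.length + 0 + 1 + 1 by omega, this]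
        simp only [List.zip_cons_cons, pvG, if_neg hc]
        simp

theorem pvAlt_eq_greedy (numbers : List String) (indexs : List Int)
    (hlen : numbers.length ≤ indexs.length) :
    GetAndRemoveNumbersSharingAlphabets_alt numbers indexs = pvGreedy numbers indexs := by
  match numbers, indexs with
  | [], is =>
    rw [GetAndRemoveNumbersSharingAlphabets_alt, pvBLoop, dif_neg (by simp),
        pvGreedy_short _ _ (by simp)]
  | [n], is =>
    rw [GetAndRemoveNumbersSharingAlphabets_alt, pvBLoop, dif_neg (by simp),
        pvGreedy_short _ _ (by simp)]
  | n :: n2 :: ns, [] => simp at hlen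
  | n :: n2 :: ns, i :: is =>
    have := pvBLoop_eq (n2 :: ns) is [] [] n i rfl (by simpa using hlen)
    simp only [List.nil_append, List.length_nil] at this
    rw [GetAndRemoveNumbersSharingAlphabets_alt, this, pvGreedy_cons]

theorem pvAlt_short (numbers : List String) (indexs : List Int) (h : numbers.length ≤ 1) :
    GetAndRemoveNumbersSharingAlphabets_alt numbers indexs = (numbers, indexs) := by
  rw [GetAndRemoveNumbersSharingAlphabets_alt, pvBLoop, dif_neg (by omega)]

-- ===== VERDICT (by name: the statement is the Claim_ definition above) =====
theorem GetAndRemoveNumbersSharingAlphabets_spec : Claim_equal_GetAndRemoveNumbersSharingAlphabets := by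
  intro numbers indexs _ hpre
  unfold Spec_GetAndRemoveNumbersSharingAlphabets
  rcases hpre with h | h
  · rw [pv_main numbers.length numbers indexs le_rfl h, pvAlt_eq_greedy numbers indexs h]
  · rw [pvA_short _ _ h, pvAlt_short _ _ h]
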